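-- pv_equiv track=rewrite | github.com/banditml/offline-policy-evaluation | banditml/banditml/preprocessing/preprocessor.py | get_preprocess_feature_order
-- ===== SOURCE A (Python) =====
-- from typing import Dict, List, Tuple
--
-- def get_preprocess_feature_order(
--     features_spec: Dict, features_to_use: List[str]
-- ) -> List[str]:
--     """Get order that features should be fed into the preprocessor. This will
--     need to match bandit-app. For consistency, we will enforce the following
--     ordering logic:
--
--     Split features into float_features (i.e. N, C )& id_features (i.e. P)
--         - 1st order by feature type ["N", "C"] & ["P"]
--         - 2nd order by alphabetical on feature_name a->z
--     """
--
--     N, C, P = [], [], []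
--     for feature_name, meta in features_spec.items():
--         if feature_name not in features_to_use and features_to_use != ["*"]:
--             pass
--         elif meta["type"] == "N":
--             N.append(feature_name)
--         elif meta["type"] == "C":
--             C.append(feature_name)
--         elif meta["type"] == "P":
--             P.append(feature_name)
--         else:
--             raise Exception(f"Feature type {meta['type']} not supported.")
--
--     N.sort()
--     C.sort()
--     P.sort()
--
--     float_feature_order = N + C
--     id_feature_order = P
--     return float_feature_order, id_feature_order
-- ===== SOURCE B (Python) =====
-- def get_preprocess_feature_order(features_spec, features_to_use):
--     """Tag each eligible feature with a numeric type rank (N=0, C=1, P=2),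
--     sort ONCE by the composite key (rank, name), then split the single sorted
--     list at the first id-feature, located by binary search, and slice."""
--     rank = {"N": 0, "C": 1, "P": 2}
--     wildcard = features_to_use == ["*"]
--     keyed = sorted(
--         (rank[meta["type"]], name)
--         for name, meta in features_spec.items()
--         if wildcard or name in features_to_use
--     )
--     lo, hi = 0, len(keyed)
--     while lo < hi:
--         mid = (lo + hi) // 2
--         if keyed[mid][0] < 2:
--             lo = mid + 1
--         else:
--             hi = mid
--     return [name for _, name in keyed[:lo]], [name for _, name in keyed[lo:]]
-- ===== Notes on version B (the rewrite author's own statement) =====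
-- stated objective: alternative
-- what changed: B replaces A's partition-into-three-buckets-then-sort-each-bucket with: tag eligible names with a numeric type rank, sort once by the composite key (rank, name), then split the single sorted list at the first id-feature via binary search and slicing; no per-type buckets exist in B.
import Mathlib
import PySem

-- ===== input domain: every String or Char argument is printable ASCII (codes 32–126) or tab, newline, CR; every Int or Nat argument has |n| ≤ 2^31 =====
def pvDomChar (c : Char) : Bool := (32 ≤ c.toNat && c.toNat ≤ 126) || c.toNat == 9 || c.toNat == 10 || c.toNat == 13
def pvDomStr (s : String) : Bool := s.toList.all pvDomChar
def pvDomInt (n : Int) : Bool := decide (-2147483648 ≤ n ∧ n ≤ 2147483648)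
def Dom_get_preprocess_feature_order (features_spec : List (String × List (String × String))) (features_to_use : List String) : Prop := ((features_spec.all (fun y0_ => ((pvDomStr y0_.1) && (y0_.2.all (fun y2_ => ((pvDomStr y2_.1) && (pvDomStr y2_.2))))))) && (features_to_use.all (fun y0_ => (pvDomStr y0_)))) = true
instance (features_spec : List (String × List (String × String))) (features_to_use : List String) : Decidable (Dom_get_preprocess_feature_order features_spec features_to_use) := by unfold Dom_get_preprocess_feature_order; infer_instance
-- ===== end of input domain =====

-- B tags each eligible feature with a numeric type rank, sorts once by the composite key
-- (rank, name) and splits the sorted list at the first id-feature found by binary search,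
-- instead of A's partition-into-three-buckets-then-sort-each; same cost, different algorithm.

-- ===== PORT A =====
-- literal transliteration of A: one pass appending each eligible feature name to the
-- bucket of its type (the 'raise' branch for an unsupported type is excluded by Pre_,
-- the port keeps the accumulator there), then each bucket is sorted.
def get_preprocess_feature_order (features_spec : List (String × List (String × String))) (features_to_use : List String) : List String × List String :=
  let acc := features_spec.foldl (fun (acc : List String × List String × List String) p =>
    if features_to_use.contains p.1 = false ∧ features_to_use ≠ ["*"] then acc
    else if (p.2.lookup "type").getD "" = "N" then (acc.1 ++ [p.1], acc.2.1, acc.2.2)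
    else if (p.2.lookup "type").getD "" = "C" then (acc.1, acc.2.1 ++ [p.1], acc.2.2)
    else if (p.2.lookup "type").getD "" = "P" then (acc.1, acc.2.1, acc.2.2 ++ [p.1])
    else acc) ([], [], [])
  let N := PySem.List.sorted acc.1 (fun x => x) false
  let C := PySem.List.sorted acc.2.1 (fun x => x) false
  let P := PySem.List.sorted acc.2.2 (fun x => x) false
  (N ++ C, P)

-- ===== PORT B =====
-- literal transliteration of B (Source B): the while-loop binary search, written with the
-- explicit fuel hi - lo (the loop strictly shrinks hi - lo, so the fuel only makes the
-- same computation total); the index keyed[mid] is always in range when the loop runs.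
def pvBisectGo (l : List (Int × String)) : Nat → Nat → Nat → Nat
  | 0, lo, _ => lo
  | fuel + 1, lo, hi =>
    if lo < hi then
      if ((l[(lo + hi) / 2]?).map Prod.fst).getD 0 < 2 then pvBisectGo l fuel ((lo + hi) / 2 + 1) hi
      else pvBisectGo l fuel lo ((lo + hi) / 2)
    else lo

def pvBisect (l : List (Int × String)) (lo hi : Nat) : Nat := pvBisectGo l (hi - lo) lo hi

-- rank[t]: Python raises KeyError off {N,C,P}; those inputs are excluded by Pre_,
-- the port returns the default 0 there.
def pvRank (t : String) : Int := (([("N", (0 : Int)), ("C", 1), ("P", 2)]).lookup t).getD 0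

-- keyed = sorted((rank[meta["type"]], name) for … if wildcard or name in features_to_use);
-- Python sorts the pairs lexicographically, which is sorted2 with the two components as keys.
def get_preprocess_feature_order_alt (features_spec : List (String × List (String × String))) (features_to_use : List String) : List String × List String :=
  let wildcard : Bool := features_to_use == ["*"]
  let keyed := PySem.List.sorted2
    ((features_spec.filter (fun p => wildcard || features_to_use.contains p.1)).map
      (fun p => (pvRank ((p.2.lookup "type").getD ""), p.1)))
    (fun x => x.1) (fun x => x.2) false
  let lo := pvBisect keyed 0 keyed.length
  ((keyed.take lo).map Prod.snd, (keyed.drop lo).map Prod.snd)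

-- ===== PRECONDITION & SPEC =====
-- Pre_ excludes (a) assoc lists with duplicate keys, which do not arise from a Python
-- dict so A's behaviour on them is accidental, and (b) inputs on which A raises: an
-- eligible feature whose meta lacks "type" (KeyError) or has a type outside {N,C,P}
-- (explicit Exception; B raises KeyError there).
def Pre_get_preprocess_feature_order (features_spec : List (String × List (String × String))) (features_to_use : List String) : Prop :=
  (features_spec.map Prod.fst).Nodup ∧
  ∀ p ∈ features_spec, (p.2.map Prod.fst).Nodup ∧
    ((features_to_use.contains p.1 || (features_to_use == ["*"])) = true →
      (p.2.lookup "type").getD "" = "N" ∨ (p.2.lookup "type").getD "" = "C" ∨ (p.2.lookup "type").getD "" = "P")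
instance (features_spec : List (String × List (String × String))) (features_to_use : List String) : Decidable (Pre_get_preprocess_feature_order features_spec features_to_use) := by unfold Pre_get_preprocess_feature_order; infer_instance

def pvWitness_get_preprocess_feature_order : (List (String × List (String × String))) × List String :=
  ([("b", [("type", "N")]), ("a", [("type", "P")]), ("c", [("type", "C")])], ["*"])

def Spec_get_preprocess_feature_order (features_spec : List (String × List (String × String))) (features_to_use : List String) (out : List String × List String) : Prop := out = get_preprocess_feature_order_alt features_spec features_to_use
instance (features_spec : List (String × List (String × String))) (features_to_use : List String) (out : List String × List String) : Decidable (Spec_get_preprocess_feature_order features_spec features_to_use out) := by unfold Spec_get_preprocess_feature_order; infer_instance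

-- ===== CLAIM (what is proved, stated in full; the proofs are below) =====
def Claim_equal_get_preprocess_feature_order : Prop := ∀ (features_spec : List (String × List (String × String))) (features_to_use : List String), Dom_get_preprocess_feature_order features_spec features_to_use → Pre_get_preprocess_feature_order features_spec features_to_use → Spec_get_preprocess_feature_order features_spec features_to_use (get_preprocess_feature_order features_spec features_to_use)

-- ===== LEMMAS AND PROOFS =====

-- eligibility test and type of a feature (proof-local shorthands)
def pvEligB (ftu : List String) (p : String × List (String × String)) : Bool :=
  ftu.contains p.1 || (ftu == ["*"])
def pvTy (p : String × List (String × String)) : String := (p.2.lookup "type").getD ""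

-- A's loop appends, per bucket, the names of the eligible features of that type in list order
lemma foldA_eq (ftu : List String) (fs : List (String × List (String × String)))
    (acc : List String × List String × List String) :
    fs.foldl (fun (acc : List String × List String × List String) p =>
      if ftu.contains p.1 = false ∧ ftu ≠ ["*"] then acc
      else if (p.2.lookup "type").getD "" = "N" then (acc.1 ++ [p.1], acc.2.1, acc.2.2)
      else if (p.2.lookup "type").getD "" = "C" then (acc.1, acc.2.1 ++ [p.1], acc.2.2)
      else if (p.2.lookup "type").getD "" = "P" then (acc.1, acc.2.1, acc.2.2 ++ [p.1])
      else acc) acc =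
    (acc.1 ++ ((fs.filter (fun p => pvEligB ftu p && (pvTy p == "N"))).map Prod.fst),
     acc.2.1 ++ ((fs.filter (fun p => pvEligB ftu p && (pvTy p == "C"))).map Prod.fst),
     acc.2.2 ++ ((fs.filter (fun p => pvEligB ftu p && (pvTy p == "P"))).map Prod.fst)) := by
  induction fs generalizing acc with
  | nil => simp
  | cons p fs ih =>
    simp only [List.foldl_cons, List.filter_cons, ih]
    by_cases he : pvEligB ftu p = true
    · have hne : ¬ (ftu.contains p.1 = false ∧ ftu ≠ ["*"]) := by
        simp only [pvEligB, Bool.or_eq_true, beq_iff_eq] at he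
        rcases he with h | h
        · rintro ⟨h1, _⟩; rw [h] at h1; cases h1
        · rintro ⟨_, h2⟩; exact h2 h
      rw [if_neg hne]
      by_cases hN : pvTy p = "N"
      · simp [pvTy] at hN; simp [hN, he, pvTy]
      · by_cases hC : pvTy p = "C"
        · simp [pvTy] at hC hN; simp [hC, he, pvTy]
        · by_cases hP : pvTy p = "P"
          · simp [pvTy] at hP hC hN; simp [hP, he, pvTy]
          · simp [pvTy] at hP hC hN; simp [hP, hC, hN, he, pvTy]
    · have hy : ftu.contains p.1 = false ∧ ftu ≠ ["*"] := by
        simp only [pvEligB, Bool.or_eq_true, beq_iff_eq, not_or] at he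
        exact ⟨by simpa using he.1, he.2⟩
      rw [if_pos hy]
      simp [he]

-- Python's tuple sort is the single-key sort under the lexicographic order on pairs
lemma pv_sorted2_lex {α κ₁ κ₂ : Type} [LinearOrder κ₁] [LinearOrder κ₂]
    (xs : List α) (k1 : α → κ₁) (k2 : α → κ₂) :
    PySem.List.sorted2 xs k1 k2 false
      = PySem.List.sorted xs (fun a => toLex (k1 a, k2 a)) false := by
  unfold PySem.List.sorted2 PySem.List.sorted
  simp only [if_neg (by decide : ¬ (false = true))]
  have hbefore : (fun a b => decide (k1 a < k1 b) || (!decide (k1 b < k1 a) && decide (k2 a < k2 b)))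
      = (fun a b : α => decide (toLex (k1 a, k2 a) < toLex (k1 b, k2 b))) := by
    funext a b
    rcases lt_trichotomy (k1 a) (k1 b) with h | h | h
    · simp [Prod.Lex.lt_iff, h]
    · simp [Prod.Lex.lt_iff, h]
    · simp [Prod.Lex.lt_iff, h, not_lt_of_gt h, ne_of_gt h]
  rw [hbefore]

-- the binary search returns the length of the <2 prefix of a (<2)/(≥2)-split list
lemma pvBisectGo_spec (u v : List (Int × String))
    (hu : ∀ x ∈ u, x.1 < 2) (hv : ∀ x ∈ v, ¬ x.1 < 2) :
    ∀ fuel lo hi, hi - lo ≤ fuel → lo ≤ u.length → u.length ≤ hi → hi ≤ (u ++ v).length →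
      pvBisectGo (u ++ v) fuel lo hi = u.length := by
  intro fuel
  induction fuel with
  | zero => intro lo hi h0 h1 h2 h3; simp only [pvBisectGo]; omega
  | succ n ih =>
    intro lo hi h0 h1 h2 h3
    by_cases hlt : lo < hi
    · rw [pvBisectGo, if_pos hlt]
      by_cases hm : (lo + hi) / 2 < u.length
      · have hget : (u ++ v)[(lo + hi) / 2]? = some u[(lo + hi) / 2] := by
          rw [List.getElem?_append_left hm]
          exact List.getElem?_eq_getElem hm
        have hlt2 : (u[(lo + hi) / 2]).1 < 2 := hu _ (List.getElem_mem _)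
        rw [hget]
        simp only [Option.map_some, Option.getD_some, if_pos hlt2]
        exact ih ((lo + hi) / 2 + 1) hi (by omega) (by omega) h2 h3
      · have hlen : (u ++ v).length = u.length + v.length := List.length_append
        have hm2 : (lo + hi) / 2 - u.length < v.length := by omega
        have hget : (u ++ v)[(lo + hi) / 2]? = some v[(lo + hi) / 2 - u.length] := by
          rw [List.getElem?_append_right (by omega)]
          exact List.getElem?_eq_getElem hm2
        have hge : ¬ (v[(lo + hi) / 2 - u.length]).1 < 2 := hv _ (List.getElem_mem _)
        rw [hget]
        simp only [Option.map_some, Option.getD_some, if_neg hge]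
        exact ih lo ((lo + hi) / 2) (by omega) h1 (by omega) (by omega)
    · rw [pvBisectGo, if_neg hlt]; omega

lemma pvBisect_spec (u v : List (Int × String))
    (hu : ∀ x ∈ u, x.1 < 2) (hv : ∀ x ∈ v, ¬ x.1 < 2) :
    pvBisect (u ++ v) 0 (u ++ v).length = u.length := by
  refine pvBisectGo_spec u v hu hv _ 0 _ (by omega) (by omega) ?_ le_rfl
  simp [List.length_append]

-- sorted names of a bucket with nodup names are strictly increasing
lemma pv_sorted_strict (l : List String) (h : l.Nodup) :
    (PySem.List.sorted l (fun x => x) false).Pairwise (· < ·) := by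
  have hle := PySem.List.sorted_pairwise l (fun x => x)
  have hnd : (PySem.List.sorted l (fun x => x) false).Nodup :=
    (PySem.List.sorted_perm l (fun x => x) false).nodup_iff.mpr h
  exact (hle.and hnd).imp (fun hx => lt_of_le_of_ne hx.1 hx.2)

-- ===== VERDICT (by name: the statement is the Claim_ definition above) =====
theorem get_preprocess_feature_order_spec : Claim_equal_get_preprocess_feature_order := by
  intro fs ftu _hDom hPre
  obtain ⟨hNodup, hAll⟩ := hPre
  unfold Spec_get_preprocess_feature_order
  unfold get_preprocess_feature_order get_preprocess_feature_order_alt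
  simp only [foldA_eq, List.nil_append]
  -- the three buckets (A's side, already characterised by foldA_eq) and their sorts
  set Nn := (fs.filter (fun p => pvEligB ftu p && (pvTy p == "N"))).map Prod.fst with hNn
  set Cn := (fs.filter (fun p => pvEligB ftu p && (pvTy p == "C"))).map Prod.fst with hCn
  set Pn := (fs.filter (fun p => pvEligB ftu p && (pvTy p == "P"))).map Prod.fst with hPn
  set sN := PySem.List.sorted Nn (fun x => x) false with hsN
  set sC := PySem.List.sorted Cn (fun x => x) false with hsC
  set sP := PySem.List.sorted Pn (fun x => x) false with hsP
  -- B's eligibility filter is A's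
  have hfiltB : fs.filter (fun p => (ftu == ["*"]) || ftu.contains p.1) = fs.filter (pvEligB ftu) := by
    apply List.filter_congr; intro p _; simp [pvEligB, Bool.or_comm]
  set elig := fs.filter (pvEligB ftu) with helig
  -- every eligible feature has type N, C or P (from Pre_)
  have hty : ∀ p ∈ elig, pvTy p = "N" ∨ pvTy p = "C" ∨ pvTy p = "P" := by
    intro p hp
    have hmem : p ∈ fs := List.mem_of_mem_filter hp
    have hpe : pvEligB ftu p = true := List.of_mem_filter hp
    exact (hAll p hmem).2 (by simpa [pvEligB] using hpe)
  -- three-way partition of elig, as a permutation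
  have hpart : elig.Perm (elig.filter (fun p => pvTy p == "N") ++
      (elig.filter (fun p => pvTy p == "C") ++ elig.filter (fun p => pvTy p == "P"))) := by
    have h1 := (List.filter_append_perm (fun p => pvTy p == "N") elig).symm
    have e1 : (elig.filter (fun p => !(pvTy p == "N"))).filter (fun p => pvTy p == "C")
        = elig.filter (fun p => pvTy p == "C") := by
      rw [List.filter_filter]
      apply List.filter_congr; intro p hp
      by_cases h : pvTy p = "C" <;> simp [h]
    have e2 : (elig.filter (fun p => !(pvTy p == "N"))).filter (fun p => !(pvTy p == "C"))
        = elig.filter (fun p => pvTy p == "P") := by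
      rw [List.filter_filter]
      apply List.filter_congr; intro p hp
      rcases hty p hp with h | h | h <;> simp [h]
    have h2' : (elig.filter (fun p => !(pvTy p == "N"))).Perm
        (elig.filter (fun p => pvTy p == "C") ++ elig.filter (fun p => pvTy p == "P")) := by
      have h2 := (List.filter_append_perm (fun p => pvTy p == "C")
        (elig.filter (fun p => !(pvTy p == "N")))).symm
      rwa [e1, e2] at h2
    exact h1.trans (List.Perm.append_left _ h2')
  -- the elig-filtered buckets coincide with A's buckets
  have hbucket : ∀ t : String, elig.filter (fun p => pvTy p == t)
      = fs.filter (fun p => pvEligB ftu p && (pvTy p == t)) := by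
    intro t
    rw [helig, List.filter_filter]
    apply List.filter_congr
    intro p _
    by_cases h1 : pvEligB ftu p = true <;> by_cases h2 : (pvTy p == t) = true <;> simp [h1, h2]
  -- bucket names have no duplicates (from the Nodup of the spec's keys)
  have hnodupT : ∀ t : String,
      ((fs.filter (fun p => pvEligB ftu p && (pvTy p == t))).map Prod.fst).Nodup := by
    intro t
    exact (List.Sublist.map Prod.fst List.filter_sublist).nodup hNodup
  -- one sorted tagged block, as a permutation of the image of its bucket
  have hblock : ∀ (t : String) (r : Int), pvRank t = r →
      ((PySem.List.sorted ((fs.filter (fun p => pvEligB ftu p && (pvTy p == t))).map Prod.fst)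
          (fun x => x) false).map (fun n => (r, n))).Perm
        ((fs.filter (fun p => pvEligB ftu p && (pvTy p == t))).map
          (fun p => (pvRank ((p.2.lookup "type").getD ""), p.1))) := by
    intro t r hr
    have h1 : ((fs.filter (fun p => pvEligB ftu p && (pvTy p == t))).map Prod.fst).map
          (fun n => ((r : Int), n))
        = (fs.filter (fun p => pvEligB ftu p && (pvTy p == t))).map
          (fun p => (pvRank ((p.2.lookup "type").getD ""), p.1)) := by
      rw [List.map_map]
      apply List.map_congr_left
      intro p hp
      have h : pvTy p = t := by
        have := List.of_mem_filter hp
        simp only [Bool.and_eq_true, beq_iff_eq] at this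
        exact this.2
      simp only [pvTy] at h
      simp [Function.comp, h, hr]
    exact h1 ▸ ((PySem.List.sorted_perm _ _ _).map _)
  -- the tagged-and-sorted blocks permute B's unsorted keyed list
  have hpermT : (sN.map (fun n => ((0 : Int), n)) ++
        (sC.map (fun n => ((1 : Int), n)) ++ sP.map (fun n => ((2 : Int), n)))).Perm
      (elig.map (fun p => (pvRank ((p.2.lookup "type").getD ""), p.1))) := by
    have hN := hblock "N" 0 (by decide)
    have hC := hblock "C" 1 (by decide)
    have hP := hblock "P" 2 (by decide)
    have hcat := hN.append (hC.append hP)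
    have heq : (fs.filter (fun p => pvEligB ftu p && (pvTy p == "N"))).map
          (fun p => (pvRank ((p.2.lookup "type").getD ""), p.1)) ++
        ((fs.filter (fun p => pvEligB ftu p && (pvTy p == "C"))).map
          (fun p => (pvRank ((p.2.lookup "type").getD ""), p.1)) ++
         (fs.filter (fun p => pvEligB ftu p && (pvTy p == "P"))).map
          (fun p => (pvRank ((p.2.lookup "type").getD ""), p.1)))
        = (elig.filter (fun p => pvTy p == "N") ++
            (elig.filter (fun p => pvTy p == "C") ++ elig.filter (fun p => pvTy p == "P"))).map
          (fun p => (pvRank ((p.2.lookup "type").getD ""), p.1)) := by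
      rw [hbucket "N", hbucket "C", hbucket "P"]
      simp [List.map_append]
    rw [heq] at hcat
    exact hcat.trans ((hpart.map _).symm)
  -- the tagged blocks are strictly increasing under the lexicographic key
  have hpwT : (sN.map (fun n => ((0 : Int), n)) ++
        (sC.map (fun n => ((1 : Int), n)) ++ sP.map (fun n => ((2 : Int), n)))).Pairwise
      (fun a b => toLex ((a : Int × String).1, a.2) < toLex ((b : Int × String).1, b.2)) := by
    have hblockpw : ∀ (r : Int) (l : List String), l.Pairwise (· < ·) →
        (l.map (fun n => (r, n))).Pairwise
          (fun a b => toLex ((a : Int × String).1, a.2) < toLex ((b : Int × String).1, b.2)) := by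
      intro r l h
      rw [List.pairwise_map]
      exact h.imp (fun hx => by simp [Prod.Lex.lt_iff, hx])
    have hcross : ∀ (r₁ r₂ : Int), r₁ < r₂ → ∀ (l₁ l₂ : List String),
        ∀ a ∈ l₁.map (fun n => (r₁, n)), ∀ b ∈ l₂.map (fun n => (r₂, n)),
          toLex ((a : Int × String).1, a.2) < toLex ((b : Int × String).1, b.2) := by
      intro r₁ r₂ hr l₁ l₂ a ha b hb
      simp only [List.mem_map] at ha hb
      obtain ⟨n, _, rfl⟩ := ha
      obtain ⟨m, _, rfl⟩ := hb
      simp [Prod.Lex.lt_iff, hr]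
    rw [List.pairwise_append]
    refine ⟨hblockpw 0 sN (pv_sorted_strict Nn (hnodupT "N")), ?_, ?_⟩
    · rw [List.pairwise_append]
      refine ⟨hblockpw 1 sC (pv_sorted_strict Cn (hnodupT "C")),
              hblockpw 2 sP (pv_sorted_strict Pn (hnodupT "P")), ?_⟩
      exact hcross 1 2 (by norm_num) sC sP
    · intro a ha b hb
      rcases List.mem_append.mp hb with hb | hb
      · exact hcross 0 1 (by norm_num) sN sC a ha b hb
      · exact hcross 0 2 (by norm_num) sN sP a ha b hb
  -- hence B's single sort produces exactly the concatenated blocks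
  have hsorted : PySem.List.sorted
        (elig.map (fun p => (pvRank ((p.2.lookup "type").getD ""), p.1)))
        (fun a => toLex ((a : Int × String).1, a.2)) false
      = sN.map (fun n => ((0 : Int), n)) ++
        (sC.map (fun n => ((1 : Int), n)) ++ sP.map (fun n => ((2 : Int), n))) :=
    PySem.List.sorted_eq_of_perm_of_pairwise_lt _ _ _ hpermT hpwT
  -- the binary search finds the boundary between the float part and the id part
  have hsplit : (sN.map (fun n => ((0 : Int), n)) ++
        (sC.map (fun n => ((1 : Int), n)) ++ sP.map (fun n => ((2 : Int), n))))
      = (sN.map (fun n => ((0 : Int), n)) ++ sC.map (fun n => ((1 : Int), n))) ++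
        sP.map (fun n => ((2 : Int), n)) := by
    rw [List.append_assoc]
  have hu : ∀ x ∈ sN.map (fun n => ((0 : Int), n)) ++ sC.map (fun n => ((1 : Int), n)),
      (x : Int × String).1 < 2 := by
    intro x hx
    rcases List.mem_append.mp hx with hx | hx <;>
      · obtain ⟨n, _, rfl⟩ := List.mem_map.mp hx; norm_num
  have hv : ∀ x ∈ sP.map (fun n => ((2 : Int), n)), ¬ (x : Int × String).1 < 2 := by
    intro x hx
    obtain ⟨n, _, rfl⟩ := List.mem_map.mp hx; norm_num
  -- assemble
  rw [hfiltB, pv_sorted2_lex]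
  rw [hsorted, hsplit]
  rw [pvBisect_spec _ _ hu hv, List.take_left, List.drop_left]
  simp [List.map_map]
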